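-- pv_equiv track=rewrite | github.com/MrBrantCode/unitest_baseline | mut_generate/mist_train_cf/cf_60061/solution.py | intricate_amalgamation
-- ===== SOURCE A (Python) =====
-- from typing import List, Optional
--
-- def intricate_amalgamation(strings: List[str]) -> str:
--     """ Combine an array of strings into a singular string utilizing a specialized alternating mechanism while maintaining original order, followed by reversal
--     """
--     if len(strings) == 0:
--         return ""
--     max_len = max([len(s) for s in strings])
--     result = ''
--     for i in range(max_len):
--         for s in strings:
--             if i < len(s):
--                 result += s[i]
--     return result[::-1]
-- ===== SOURCE B (Python) =====
-- def intricate_amalgamation(strings):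
--     # Round-robin over live iterators: take one char from each still-live
--     # string per round (column by column), dropping exhausted iterators,
--     # then reverse the collected characters once.
--     its = [iter(s) for s in strings]
--     out = []
--     while its:
--         nxt = []
--         for it in its:
--             c = next(it, None)
--             if c is not None:
--                 out.append(c)
--                 nxt.append(it)
--         its = nxt
--     return ''.join(reversed(out))
-- ===== Notes on version B (the rewrite author's own statement) =====
-- stated objective: alternative
-- what changed: Replaces the index-guarded double loop over range(max_len) with a round-robin drain of live iterators (no max computation, no indexing, exhausted strings dropped per round), collecting characters in a list and reversing once at the end.
import Mathlib
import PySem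

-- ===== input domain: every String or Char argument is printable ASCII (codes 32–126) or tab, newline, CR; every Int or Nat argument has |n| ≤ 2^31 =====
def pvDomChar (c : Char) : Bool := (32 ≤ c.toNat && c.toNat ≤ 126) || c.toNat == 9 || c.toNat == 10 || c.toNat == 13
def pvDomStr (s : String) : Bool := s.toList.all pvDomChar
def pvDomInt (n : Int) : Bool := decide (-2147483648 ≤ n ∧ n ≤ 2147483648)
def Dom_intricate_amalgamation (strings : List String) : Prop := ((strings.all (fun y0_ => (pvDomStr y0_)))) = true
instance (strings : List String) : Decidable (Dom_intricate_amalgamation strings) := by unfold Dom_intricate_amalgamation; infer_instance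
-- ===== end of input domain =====

-- B replaces A's index-guarded double loop over range(max_len) with a round-robin drain of
-- live character streams (objective: alternative structure, same exact result).

-- ===== PORT A =====
-- Python strings are ported on the List Char side (result accumulates chars; String.ofList at the end).
def intricate_amalgamation (strings : List String) : String :=
  if strings.length = 0 then "" else
  -- max([len(s) for s in strings]); strings is nonempty in this branch, so max? is some (getD 0 never defaults)
  let maxLen : Int := (PySem.List.max? (strings.map (fun s => PySem.Str.len s)) (fun x => x)).getD 0
  let result : List Char := (PySem.List.pyRange 0 maxLen 1).foldl (fun res i =>
      strings.foldl (fun res s =>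
        if i < PySem.Str.len s then
          res ++ ((PySem.Str.pyGet? s i).elim [] (fun c => [c]))   -- result += s[i]
        else res) res) []
  String.ofList result.reverse   -- result[::-1] (PySem.List.slice?_none_none_neg_one: reverse)

-- ===== PORT B =====
-- termination measure helper for the drain loop (cited by decreasing_by)
theorem pvDrain_measure_le (its : List (List Char)) :
    ((((its.filter (fun l => !l.isEmpty)).map List.tail).map List.length).sum
      + ((its.filter (fun l => !l.isEmpty)).map List.tail).length)
      ≤ (its.map List.length).sum := by
  induction its with
  | nil => simp
  | cons l rest ih =>
    cases l with
    | nil =>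
      simp only [List.filter_cons, List.isEmpty_nil, Bool.not_true, Bool.false_eq_true,
        if_false, List.map_cons, List.sum_cons, List.length_nil]
      omega
    | cons c t =>
      simp only [List.filter_cons, List.isEmpty_cons, Bool.not_false, if_true,
        List.map_cons, List.tail_cons, List.sum_cons, List.length_cons]
      omega

-- nxt: the streams still live after this round, each advanced by one char
def pvAdvance (its : List (List Char)) : List (List Char) :=
  (its.filter (fun l => !l.isEmpty)).map List.tail

-- its = [iter(s) for s in strings]; each round takes the next char of every live stream
-- (out.append) and keeps only the still-live streams (nxt = pvAdvance its), until its is empty.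
def pvDrain (its : List (List Char)) : List Char :=
  if its = [] then []
  else (its.filterMap List.head?) ++ pvDrain (pvAdvance its)
termination_by (its.map List.length).sum + its.length
decreasing_by
  have hle := pvDrain_measure_le its
  have h1 : 1 ≤ its.length := by
    rename_i h
    cases its with
    | nil => exact absurd rfl h
    | cons a b => simp
  unfold pvAdvance
  omega

def intricate_amalgamation_alt (strings : List String) : String :=
  String.ofList (pvDrain (strings.map String.toList)).reverse   -- ''.join(reversed(out))

-- ===== PRECONDITION & SPEC =====
def Spec_intricate_amalgamation (strings : List String) (out : String) : Prop := out = intricate_amalgamation_alt strings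
instance (strings : List String) (out : String) : Decidable (Spec_intricate_amalgamation strings out) := by unfold Spec_intricate_amalgamation; infer_instance

-- ===== CLAIM (what is proved, stated in full; the proofs are below) =====
def Claim_equal_intricate_amalgamation : Prop := ∀ (strings : List String), Dom_intricate_amalgamation strings → Spec_intricate_amalgamation strings (intricate_amalgamation strings)

-- ===== LEMMAS AND PROOFS =====

-- column i+1 of its = column i of the advanced live streams
theorem pvCol_shift (its : List (List Char)) (i : Nat) :
    (pvAdvance its).filterMap (fun l => l[i]?)
      = its.filterMap (fun l => l[i+1]?) := by
  unfold pvAdvance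
  induction its with
  | nil => rfl
  | cons l rest ih =>
    cases l with
    | nil => simpa using ih
    | cons c t =>
      simp only [List.filter_cons, List.isEmpty_cons, Bool.not_false, if_true,
        List.map_cons, List.tail_cons, List.filterMap_cons, List.getElem?_cons_succ, ih]

-- the drain produces the columns 0..n-1 in order, for any n bounding every stream length
theorem pvDrain_eq_flatMap (n : Nat) : ∀ (its : List (List Char)),
    (∀ l ∈ its, l.length ≤ n) →
    pvDrain its = (List.range n).flatMap (fun i => its.filterMap (fun l => l[i]?)) := by
  induction n with
  | zero =>
    intro its h
    have hall : ∀ l ∈ its, l = [] := by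
      intro l hl; exact List.eq_nil_of_length_eq_zero (Nat.le_zero.mp (h l hl))
    rw [pvDrain.eq_def]
    split
    · simp
    · have h1 : its.filterMap List.head? = [] := by
        simp only [List.filterMap_eq_nil_iff]
        intro l hl; rw [hall l hl]; rfl
      have h2 : pvAdvance its = [] := by
        unfold pvAdvance
        rw [show its.filter (fun l => !l.isEmpty) = [] from by
          simp only [List.filter_eq_nil_iff]
          intro l hl; rw [hall l hl]; simp]
        rfl
      rw [h1, h2, pvDrain.eq_def]
      simp
  | succ n ih =>
    intro its h
    rw [pvDrain.eq_def]
    split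
    · rename_i hnil; subst hnil; simp
    · have hb : ∀ l ∈ pvAdvance its, l.length ≤ n := by
        unfold pvAdvance
        intro l hl
        obtain ⟨l', hl', rfl⟩ := List.mem_map.mp hl
        have hm := List.mem_filter.mp hl'
        have hlen := h l' hm.1
        have hne : l' ≠ [] := by
          intro hc; rw [hc] at hm; simp at hm
        have hpos : 0 < l'.length := List.length_pos_iff.mpr hne
        simp only [List.length_tail]; omega
      rw [ih _ hb, List.range_succ_eq_map, List.flatMap_cons, List.flatMap_map]
      congr 1
      · apply List.filterMap_congr
        intro l _; exact List.head?_eq_getElem?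
      · apply List.flatMap_congr
        intro i _
        simpa using pvCol_shift its i

-- A's inner loop step, rewritten pointwise: append the k-th char when it exists
theorem pvInner_fun_eq (k : Nat) :
    (fun (res : List Char) (s : String) =>
        if ((k : Nat) : Int) < PySem.Str.len s then
          res ++ ((PySem.Str.pyGet? s ((k : Nat) : Int)).elim [] (fun c => [c]))
        else res)
      = (fun res s => res ++ (s.toList[k]?).toList) := by
  funext res s
  by_cases hk : k < s.toList.length
  · rw [if_pos (by rw [PySem.Str.len_eq]; exact_mod_cast hk)]
    rw [PySem.Str.pyGet?_natCast, List.getElem?_eq_getElem hk]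
    rfl
  · rw [if_neg (by rw [PySem.Str.len_eq]; exact_mod_cast hk)]
    rw [List.getElem?_eq_none (by omega)]
    simp

-- flatMap of the optional chars = filterMap on the char lists
theorem pvFlatOpt (strings : List String) (k : Nat) :
    strings.flatMap (fun s => (s.toList[k]?).toList)
      = (strings.map String.toList).filterMap (fun l => l[k]?) := by
  induction strings with
  | nil => rfl
  | cons s rest ih =>
    simp only [List.flatMap_cons, List.map_cons, List.filterMap_cons, ih]
    cases s.toList[k]? <;> rfl

-- A's accumulated characters are the columns 0..M-1 in order
theorem pvA_eq_flatMap (strings : List String) (M : Int) :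
    (PySem.List.pyRange 0 M 1).foldl (fun res i =>
      strings.foldl (fun res s =>
        if i < PySem.Str.len s then
          res ++ ((PySem.Str.pyGet? s i).elim [] (fun c => [c]))
        else res) res) []
    = (List.range M.toNat).flatMap (fun k => (strings.map String.toList).filterMap (fun l => l[k]?)) := by
  rw [PySem.List.pyRange_one, List.foldl_map]
  have hsub : M - 0 = M := by ring
  rw [hsub]
  have houter : (fun (x : List Char) (y : Nat) =>
      strings.foldl (fun res s =>
        if ((0 : Int) + (y : Int)) < PySem.Str.len s then
          res ++ ((PySem.Str.pyGet? s ((0 : Int) + (y : Int))).elim [] (fun c => [c]))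
        else res) x)
      = (fun x y => x ++ (strings.map String.toList).filterMap (fun l => l[y]?)) := by
    funext x y
    have h0 : ((0 : Int) + (y : Int)) = ((y : Nat) : Int) := by ring
    rw [show (fun (res : List Char) (s : String) =>
        if ((0 : Int) + (y : Int)) < PySem.Str.len s then
          res ++ ((PySem.Str.pyGet? s ((0 : Int) + (y : Int))).elim [] (fun c => [c]))
        else res) = (fun res s => res ++ (s.toList[y]?).toList) from by
      rw [h0]; exact pvInner_fun_eq y]
    rw [PySem.List.foldl_append_eq_flatMap, pvFlatOpt]
  rw [houter, PySem.List.foldl_append_eq_flatMap]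
  simp

-- ===== VERDICT (by name: the statement is the Claim_ definition above) =====
theorem intricate_amalgamation_spec : Claim_equal_intricate_amalgamation := by
  intro strings _
  unfold Spec_intricate_amalgamation intricate_amalgamation intricate_amalgamation_alt
  by_cases hnil : strings = []
  · subst hnil
    simp [pvDrain.eq_def]
  · rw [if_neg (by simpa using fun h => hnil (List.length_eq_zero_iff.mp h))]
    obtain ⟨s0, rest, rfl⟩ := List.exists_cons_of_ne_nil hnil
    set xs := s0 :: rest with hxs
    have hm : PySem.List.max? (xs.map (fun s => PySem.Str.len s)) (fun x => x)
        = some (((rest.map (fun s => PySem.Str.len s)).foldl max (PySem.Str.len s0))) := by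
      rw [hxs, List.map_cons, PySem.List.max?_id_cons]
    set m : Int := (rest.map (fun s => PySem.Str.len s)).foldl max (PySem.Str.len s0) with hmdef
    have hmax : ∀ y ∈ xs.map (fun s => PySem.Str.len s), y ≤ m := by
      intro y hy
      simpa using PySem.List.max?_isMax hm y hy
    have hbound : ∀ l ∈ xs.map String.toList, l.length ≤ m.toNat := by
      intro l hl
      obtain ⟨s, hs, rfl⟩ := List.mem_map.mp hl
      have := hmax (PySem.Str.len s) (List.mem_map.mpr ⟨s, hs, rfl⟩)
      rw [PySem.Str.len_eq] at this
      omega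
    simp only [hm, Option.getD_some]
    rw [pvA_eq_flatMap xs m, pvDrain_eq_flatMap m.toNat (xs.map String.toList) hbound]
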